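-- pv_equiv track=rewrite | github.com/epilectrik/voynich | phases/MIDDLE_SUBCOMPONENT_GRAMMAR/scripts/test6_folio_progression.py | coverage_count
-- ===== SOURCE A (Python) =====
-- from collections import Counter, defaultdict
--
-- def coverage_count(middles, n):
--     """Count how many different MIDDLEs contain each n-gram."""
--     gram_to_middles = defaultdict(set)
--     for m in middles:
--         if len(m) >= n:
--             for i in range(len(m) - n + 1):
--                 ng = m[i:i+n]
--                 gram_to_middles[ng].add(m)
--     return {g: len(ms) for g, ms in gram_to_middles.items()}
-- ===== SOURCE B (Python) =====
-- def coverage_count(middles, n):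
--     """Count how many different MIDDLEs contain each n-gram."""
--     uniq = list(dict.fromkeys(middles))          # distinct middles, first-seen order
--     grams = dict.fromkeys(m[i:i + n]             # distinct n-grams, first-seen order
--                           for m in uniq if len(m) >= n
--                           for i in range(len(m) - n + 1))
--     # a distinct middle contains gram g iff g occurs in it as a substring
--     return {g: sum(g in m for m in uniq) for g in grams}
-- ===== Notes on version B (the rewrite author's own statement) =====
-- stated objective: alternative
-- what changed: A builds a gram-to-set-of-middles index incrementally while sliding over each middle; B is a staged pipeline with no per-gram sets or counters: it dedups the middles, collects the distinct n-grams once, and then computes each gram's count directly as the number of distinct middles that contain it as a substring ('g in m'). Pre_ excludes negative n, where Python reinterprets the slice bound i+n from the string's end (negative-slice wraparound) and both programs' outputs are accidents of slicing rather than any notion of n-gram coverage.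
-- outside the precondition, e.g. on coverage_count(['b', 'ba'], -1): A returns {'': 2, 'b': 1}, B returns {'': 2, 'b': 2}
import Mathlib
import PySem

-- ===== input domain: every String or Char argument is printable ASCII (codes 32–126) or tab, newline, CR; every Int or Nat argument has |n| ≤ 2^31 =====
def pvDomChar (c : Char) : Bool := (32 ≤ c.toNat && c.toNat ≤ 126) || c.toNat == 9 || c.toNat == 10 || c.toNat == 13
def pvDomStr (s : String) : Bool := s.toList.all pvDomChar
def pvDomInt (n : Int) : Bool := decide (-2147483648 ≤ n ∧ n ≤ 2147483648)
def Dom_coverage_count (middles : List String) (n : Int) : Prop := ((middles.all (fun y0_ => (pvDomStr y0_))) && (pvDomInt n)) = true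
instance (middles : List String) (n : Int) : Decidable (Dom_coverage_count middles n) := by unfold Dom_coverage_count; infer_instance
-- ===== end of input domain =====

-- B replaces A's incrementally built gram→set-of-middles index by a staged pipeline:
-- dedup the middles, collect the distinct n-grams, then count each gram directly as the
-- number of distinct middles containing it as a substring; equality is proved for 0 ≤ n.

-- ===== PORT A =====
def coverage_count (middles : List String) (n : Int) : List (String × Int) :=
  let gram_to_middles : PySem.Dict String (PySem.Set String) :=
    middles.foldl (fun d m =>
      if n ≤ PySem.Str.len m then
        (PySem.List.pyRange 0 (PySem.Str.len m - n + 1) 1).foldl (fun d i =>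
          let ng := PySem.Str.slice m (some i) (some (i + n))
          d.insert ng (PySem.Set.add (d.getD ng PySem.Set.empty) m)) d
      else d) PySem.Dict.empty
  gram_to_middles.items.map (fun p => (p.1, PySem.Set.len p.2))

-- ===== PORT B =====
def coverage_count_alt (middles : List String) (n : Int) : List (String × Int) :=
  let uniq := PySem.List.dedup middles
  let grams := PySem.List.dedup (uniq.flatMap (fun m =>
    if n ≤ PySem.Str.len m then
      (PySem.List.pyRange 0 (PySem.Str.len m - n + 1) 1).map
        (fun i => PySem.Str.slice m (some i) (some (i + n)))
    else []))
  (grams.foldl (fun d g =>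
      d.insert g ((uniq.map (fun m => if PySem.Str.isIn g m then (1 : Int) else 0)).sum))
    PySem.Dict.empty).items

-- ===== PRECONDITION & SPEC =====
-- Pre_ excludes negative n, on which A still returns: there Python reinterprets the slice
-- bound i+n from the string's end (negative-slice wraparound), so both programs' outputs
-- are accidents of slicing rather than any notion of n-gram coverage.
def Pre_coverage_count (middles : List String) (n : Int) : Prop := 0 ≤ n
instance (middles : List String) (n : Int) : Decidable (Pre_coverage_count middles n) := by unfold Pre_coverage_count; infer_instance
def pvWitness_coverage_count : List String × Int := (["ab", "b", "ab"], 1)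
def Spec_coverage_count (middles : List String) (n : Int) (out : List (String × Int)) : Prop := out = coverage_count_alt middles n
instance (middles : List String) (n : Int) (out : List (String × Int)) : Decidable (Spec_coverage_count middles n out) := by unfold Spec_coverage_count; infer_instance

-- ===== CLAIM (what is proved, stated in full; the proofs are below) =====
def Claim_equal_coverage_count : Prop := ∀ (middles : List String) (n : Int), Dom_coverage_count middles n → Pre_coverage_count middles n → Spec_coverage_count middles n (coverage_count middles n)

-- ===== LEMMAS AND PROOFS =====

-- proof-side helpers --------------------------------------------------------

/-- the list of n-gram occurrences of `m`, in order (with duplicates) -/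
def gramOcc (m : String) (n : Int) : List String :=
  (PySem.List.pyRange 0 (PySem.Str.len m - n + 1) 1).map
    (fun i => PySem.Str.slice m (some i) (some (i + n)))

/-- A's inner-loop step: add `m` to the set registered for gram `g` -/
def step2 (m : String) (d : PySem.Dict String (PySem.Set String)) (g : String) :
    PySem.Dict String (PySem.Set String) :=
  d.insert g (PySem.Set.add (d.getD g PySem.Set.empty) m)

/-- A's outer-loop step -/
def stepA (n : Int) (d : PySem.Dict String (PySem.Set String)) (m : String) :
    PySem.Dict String (PySem.Set String) :=
  if n ≤ PySem.Str.len m then (gramOcc m n).foldl (step2 m) d else d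

/-- A's outer-loop step with the gram occurrences deduplicated -/
def stepAred (n : Int) (d : PySem.Dict String (PySem.Set String)) (m : String) :
    PySem.Dict String (PySem.Set String) :=
  if n ≤ PySem.Str.len m then (PySem.List.dedup (gramOcc m n)).foldl (step2 m) d else d

/-- the counter simulation of A's outer-loop step (proof-side only) -/
def stepB (n : Int) (c : PySem.Dict String Int) (m : String) : PySem.Dict String Int :=
  if n ≤ PySem.Str.len m then
    (PySem.List.dedup (gramOcc m n)).foldl (fun c g => c.modify g 0 (· + 1)) c
  else c

/-- the flat stream of per-middle deduplicated gram occurrences -/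
def streamOf (n : Int) (l : List String) : List String :=
  l.flatMap (fun m => PySem.List.dedup (gramOcc m n))

/-- the relation between A's dict of sets and the counter -/
def RelAB (d : PySem.Dict String (PySem.Set String)) (c : PySem.Dict String Int) : Prop :=
  c.items = d.items.map (fun p => (p.1, PySem.Set.len p.2))

/-- first-occurrence filter relative to already-seen elements -/
def sieve (seen : List String) : List String → List String
  | [] => []
  | x :: t => if x ∈ seen then sieve seen t else x :: sieve (x :: seen) t

-- bridge from port A to the helper formulation --------------------------------

lemma bridgeA (middles : List String) (n : Int) :
    coverage_count middles n =
      (middles.foldl (stepA n) PySem.Dict.empty).items.map (fun p => (p.1, PySem.Set.len p.2)) := by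
  have h : stepA n = (fun (d : PySem.Dict String (PySem.Set String)) (m : String) =>
      if n ≤ PySem.Str.len m then
        (PySem.List.pyRange 0 (PySem.Str.len m - n + 1) 1).foldl (fun d i =>
          let ng := PySem.Str.slice m (some i) (some (i + n))
          d.insert ng (PySem.Set.add (d.getD ng PySem.Set.empty) m)) d
      else d) := by
    funext d m
    simp only [stepA, step2, gramOcc, List.foldl_map]
  rw [coverage_count, h]

-- sieve / dedup --------------------------------------------------------------

lemma sieve_congr (l : List String) :
    ∀ (s₁ s₂ : List String), (∀ x, x ∈ s₁ ↔ x ∈ s₂) → sieve s₁ l = sieve s₂ l := by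
  induction l with
  | nil => intro s₁ s₂ h; rfl
  | cons x t ih =>
    intro s₁ s₂ h
    simp only [sieve]
    by_cases hx : x ∈ s₁
    · rw [if_pos hx, if_pos ((h x).1 hx)]
      exact ih s₁ s₂ h
    · rw [if_neg hx, if_neg (fun hx2 => hx ((h x).2 hx2))]
      have := ih (x :: s₁) (x :: s₂) (by intro y; simp [h y])
      rw [this]

lemma update_eq_append_sieve (l : List String) :
    ∀ (s : List String), PySem.Set.update s l = s ++ sieve s l := by
  induction l with
  | nil => intro s; simp [PySem.Set.update, sieve]
  | cons x t ih =>
    intro s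
    rw [PySem.Set.update_cons]
    by_cases hx : x ∈ s
    · rw [PySem.Set.add_of_mem hx, ih s]
      simp [sieve, hx]
    · rw [PySem.Set.add_of_not_mem hx, ih (s ++ [x])]
      have : sieve (s ++ [x]) t = sieve (x :: s) t := by
        apply sieve_congr; intro y; simp [or_comm]
      rw [this]
      simp [sieve, hx]

lemma dedup_eq_sieve (l : List String) : PySem.List.dedup l = sieve [] l := by
  rw [PySem.List.dedup_eq_ofList, ← PySem.Set.update_nil_left, update_eq_append_sieve]
  simp

lemma foldl_sieve {β : Type} (step : β → String → β) (Cov : β → String → Prop) (I : β → Prop)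
    (hI : ∀ d m, I d → I (step d m))
    (h1 : ∀ d m, I d → Cov (step d m) m)
    (h2 : ∀ d m m', I d → Cov d m → Cov (step d m') m)
    (h3 : ∀ d m, I d → Cov d m → step d m = d) :
    ∀ (l seen : List String) (d : β), I d → (∀ m ∈ seen, Cov d m) →
      l.foldl step d = (sieve seen l).foldl step d := by
  intro l
  induction l with
  | nil => intro seen d _ _; rfl
  | cons m t ih =>
    intro seen d hd hseen
    simp only [sieve, List.foldl]
    by_cases hm : m ∈ seen
    · rw [if_pos hm, h3 d m hd (hseen m hm)]
      exact ih seen d hd hseen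
    · rw [if_neg hm]
      simp only [List.foldl]
      apply ih (m :: seen) (step d m) (hI d m hd)
      intro m' hm'
      rcases List.mem_cons.1 hm' with h' | h'
      · subst h'; exact h1 d m' hd
      · exact h2 d m' m hd (hseen m' h')

lemma foldl_dedup {β : Type} (step : β → String → β) (Cov : β → String → Prop) (I : β → Prop)
    (hI : ∀ d m, I d → I (step d m))
    (h1 : ∀ d m, I d → Cov (step d m) m)
    (h2 : ∀ d m m', I d → Cov d m → Cov (step d m') m)
    (h3 : ∀ d m, I d → Cov d m → step d m = d)
    (l : List String) (d : β) (hd : I d) :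
    l.foldl step d = (PySem.List.dedup l).foldl step d := by
  rw [dedup_eq_sieve]
  exact foldl_sieve step Cov I hI h1 h2 h3 l [] d hd (by simp)

-- facts about step2 and its folds --------------------------------------------

lemma insert_getD_self (d : PySem.Dict String (PySem.Set String)) (g : String)
    (hnd : d.keys.Nodup) (hc : d.contains g = true) :
    d.insert g (d.getD g PySem.Set.empty) = d := by
  apply PySem.Dict.ext
  rw [PySem.Dict.items_insert_of_contains d _ hc]
  have hid : ∀ p ∈ d.items,
      (if (p.1 == g) = true then (g, d.getD g PySem.Set.empty) else p) = p := by
    intro p hp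
    by_cases h1 : p.1 = g
    · have hq : (p.1, p.2) ∈ d.items := by simpa using hp
      have := PySem.Dict.getD_of_mem_items d hq hnd PySem.Set.empty
      rw [h1] at this
      rw [this]
      rw [← h1]
      simp
    · simp [h1]
  calc d.items.map (fun p => if (p.1 == g) = true then (g, d.getD g PySem.Set.empty) else p)
      = d.items.map id := List.map_congr_left hid
    _ = d.items := List.map_id _

lemma step2_mono (m : String) (d : PySem.Dict String (PySem.Set String)) (g g' : String)
    (x : String) (hx : x ∈ d.getD g' PySem.Set.empty) :
    x ∈ (step2 m d g).getD g' PySem.Set.empty := by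
  unfold step2
  rw [PySem.Dict.getD_insert]
  split_ifs with h
  · subst h; exact (PySem.Set.mem_add _ _ _).2 (Or.inl hx)
  · exact hx

lemma step2_id (m : String) (d : PySem.Dict String (PySem.Set String)) (g : String)
    (hnd : d.keys.Nodup) (hm : m ∈ d.getD g PySem.Set.empty) :
    step2 m d g = d := by
  have hc : d.contains g = true := by
    by_cases h : d.contains g = true
    · exact h
    · have := PySem.Dict.getD_of_not_contains d (by simpa using h) (d0 := PySem.Set.empty) (k := g)
      rw [this] at hm
      simp [PySem.Set.empty] at hm
  unfold step2
  rw [PySem.Set.add_of_mem hm]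
  exact insert_getD_self d g hnd hc

lemma step2_nodup (m : String) (d : PySem.Dict String (PySem.Set String)) (g : String)
    (hnd : d.keys.Nodup) : (step2 m d g).keys.Nodup := by
  unfold step2
  exact PySem.Dict.nodup_keys_insert d g _ hnd

lemma fold2_mono (m : String) (gs : List String) :
    ∀ (d : PySem.Dict String (PySem.Set String)) (g' x : String),
      x ∈ d.getD g' PySem.Set.empty → x ∈ (gs.foldl (step2 m) d).getD g' PySem.Set.empty := by
  induction gs with
  | nil => intro d g' x hx; exact hx
  | cons g t ih =>
    intro d g' x hx
    exact ih (step2 m d g) g' x (step2_mono m d g g' x hx)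

lemma fold2_mem (m : String) (gs : List String) :
    ∀ (d : PySem.Dict String (PySem.Set String)) (g : String), g ∈ gs →
      m ∈ (gs.foldl (step2 m) d).getD g PySem.Set.empty := by
  induction gs with
  | nil => intro d g h; cases h
  | cons g' t ih =>
    intro d g hg
    rcases List.mem_cons.1 hg with h | h
    · subst h
      apply fold2_mono m t (step2 m d g) g m
      unfold step2
      rw [PySem.Dict.getD_insert_self]
      exact (PySem.Set.mem_add _ _ _).2 (Or.inr rfl)
    · exact ih (step2 m d g') g h

lemma fold2_id (m : String) (gs : List String) :
    ∀ (d : PySem.Dict String (PySem.Set String)), d.keys.Nodup →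
      (∀ g ∈ gs, m ∈ d.getD g PySem.Set.empty) → gs.foldl (step2 m) d = d := by
  induction gs with
  | nil => intro d _ _; rfl
  | cons g t ih =>
    intro d hnd h
    simp only [List.foldl]
    rw [step2_id m d g hnd (h g List.mem_cons_self)]
    exact ih d hnd (fun g' hg' => h g' (List.mem_cons_of_mem g hg'))

lemma fold2_nodup (m : String) (gs : List String) :
    ∀ (d : PySem.Dict String (PySem.Set String)), d.keys.Nodup →
      (gs.foldl (step2 m) d).keys.Nodup := by
  induction gs with
  | nil => intro d hnd; exact hnd
  | cons g t ih =>
    intro d hnd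
    exact ih (step2 m d g) (step2_nodup m d g hnd)

lemma fold2_getD_sub (m : String) (gs : List String) :
    ∀ (d : PySem.Dict String (PySem.Set String)) (g x : String),
      x ∈ (gs.foldl (step2 m) d).getD g PySem.Set.empty →
      x ∈ d.getD g PySem.Set.empty ∨ x = m := by
  induction gs with
  | nil => intro d g x hx; exact Or.inl hx
  | cons g' t ih =>
    intro d g x hx
    rcases ih (step2 m d g') g x hx with h | h
    · unfold step2 at h
      rw [PySem.Dict.getD_insert] at h
      split_ifs at h with he
      · subst he
        rcases (PySem.Set.mem_add _ _ _).1 h with h' | h'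
        · exact Or.inl h'
        · exact Or.inr h'
      · exact Or.inl h
    · exact Or.inr h

-- reduction of A's step to the deduplicated step -----------------------------

lemma stepA_eq_red (n : Int) (d : PySem.Dict String (PySem.Set String)) (m : String)
    (hnd : d.keys.Nodup) : stepA n d m = stepAred n d m := by
  unfold stepA stepAred
  split_ifs with hlen
  · exact foldl_dedup (step2 m) (fun d g => m ∈ d.getD g PySem.Set.empty)
      (fun d => d.keys.Nodup) (fun d g hd => step2_nodup m d g hd)
      (fun d g _ => by
        show m ∈ (step2 m d g).getD g PySem.Set.empty
        unfold step2
        rw [PySem.Dict.getD_insert_self]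
        exact (PySem.Set.mem_add _ _ _).2 (Or.inr rfl))
      (fun d g g' _ hc => step2_mono m d g' g m hc)
      (fun d g hd hc => step2_id m d g hd hc)
      (gramOcc m n) d hnd
  · rfl

lemma stepA_nodup (n : Int) (d : PySem.Dict String (PySem.Set String)) (m : String)
    (hnd : d.keys.Nodup) : (stepA n d m).keys.Nodup := by
  unfold stepA
  split_ifs with hlen
  · exact fold2_nodup m (gramOcc m n) d hnd
  · exact hnd

-- A's outer fold may be taken over the deduplicated middles ------------------

def CovA (n : Int) (d : PySem.Dict String (PySem.Set String)) (m : String) : Prop :=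
  n ≤ PySem.Str.len m → ∀ g ∈ gramOcc m n, m ∈ d.getD g PySem.Set.empty

lemma outer_dedup (n : Int) (middles : List String) :
    middles.foldl (stepA n) PySem.Dict.empty =
      (PySem.List.dedup middles).foldl (stepA n) PySem.Dict.empty := by
  apply foldl_dedup (stepA n) (CovA n) (fun d => d.keys.Nodup)
  · exact fun d m hd => stepA_nodup n d m hd
  · intro d m _ hlen g hg
    unfold stepA
    rw [if_pos hlen]
    exact fold2_mem m (gramOcc m n) d g hg
  · intro d m m' _ hcov hlen g hg
    unfold stepA
    split_ifs with h
    · exact fold2_mono m' (gramOcc m' n) d g m (hcov hlen g hg)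
    · exact hcov hlen g hg
  · intro d m hd hcov
    unfold stepA
    split_ifs with h
    · exact fold2_id m (gramOcc m n) d hd (hcov h)
    · rfl
  · simp [PySem.Dict.empty, PySem.Dict.keys]

lemma foldl_congr_inv {β : Type} (step step' : β → String → β) (I : β → Prop)
    (hI : ∀ d m, I d → I (step d m))
    (heq : ∀ d m, I d → step d m = step' d m) :
    ∀ (l : List String) (d : β), I d → l.foldl step d = l.foldl step' d := by
  intro l
  induction l with
  | nil => intro d _; rfl
  | cons m t ih =>
    intro d hd
    simp only [List.foldl]
    rw [heq d m hd]
    exact heq d m hd ▸ ih (step d m) (hI d m hd)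

-- the parallel simulation A-dict ↦ counter ------------------------------------

lemma rel_keys (d : PySem.Dict String (PySem.Set String)) (c : PySem.Dict String Int)
    (h : RelAB d c) : c.keys = d.keys := by
  unfold RelAB at h
  simp only [PySem.Dict.keys, h, List.map_map]
  rfl

lemma par_step (m g : String) (d : PySem.Dict String (PySem.Set String))
    (c : PySem.Dict String Int) (hnd : d.keys.Nodup) (hrel : RelAB d c)
    (hm : m ∉ d.getD g PySem.Set.empty) :
    RelAB (step2 m d g) (c.modify g 0 (· + 1)) := by
  have hkeys := rel_keys d c hrel
  have hndc : c.keys.Nodup := by rw [hkeys]; exact hnd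
  have hmodify : c.modify g 0 (· + 1) = c.insert g (c.getD g 0 + 1) := rfl
  have hrel' : c.items = d.items.map (fun p => (p.1, PySem.Set.len p.2)) := hrel
  by_cases hc : d.contains g = true
  · have hgk : g ∈ d.keys := (PySem.Dict.contains_iff_mem_keys d g).1 hc
    obtain ⟨p, hp, hp1⟩ := List.mem_map.1 (by simpa only [PySem.Dict.keys] using hgk)
    have hgd : d.getD g PySem.Set.empty = p.2 := by
      have hq : (p.1, p.2) ∈ d.items := by simpa using hp
      have := PySem.Dict.getD_of_mem_items d hq hnd PySem.Set.empty
      rw [hp1] at this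
      exact this
    have hm' : m ∉ p.2 := hgd ▸ hm
    have hcc : c.contains g = true := by
      rw [PySem.Dict.contains_eq_decide_mem_keys, hkeys]
      rw [PySem.Dict.contains_eq_decide_mem_keys] at hc
      exact hc
    have hcs : (g, PySem.Set.len p.2) ∈ c.items := by
      rw [hrel']
      exact List.mem_map.2 ⟨p, hp, by rw [hp1]⟩
    have hcg : c.getD g 0 = PySem.Set.len p.2 := PySem.Dict.getD_of_mem_items c hcs hndc 0
    unfold RelAB step2
    rw [hmodify, PySem.Dict.items_insert_of_contains c _ hcc,
        PySem.Dict.items_insert_of_contains d _ hc, hrel', List.map_map, List.map_map]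
    apply List.map_congr_left
    intro q hq
    simp only [Function.comp]
    by_cases h1 : q.1 = g
    · have hgd' : d.getD g ([] : PySem.Set String) = p.2 := hgd
      simp [h1, hcg, hgd', PySem.Set.add_of_not_mem hm', PySem.Set.len,
        List.length_append]
    · simp [h1]
  · have hc' : d.contains g = false := by simpa using hc
    have hcc : c.contains g = false := by
      rw [PySem.Dict.contains_eq_decide_mem_keys, hkeys]
      rw [PySem.Dict.contains_eq_decide_mem_keys] at hc'
      exact hc'
    have hgd : d.getD g PySem.Set.empty = PySem.Set.empty :=
      PySem.Dict.getD_of_not_contains d hc' (d0 := PySem.Set.empty)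
    have hcg : c.getD g 0 = 0 := PySem.Dict.getD_of_not_contains c hcc (d0 := 0)
    unfold RelAB step2
    rw [hmodify, PySem.Dict.items_insert_of_not_contains c _ hcc,
        PySem.Dict.items_insert_of_not_contains d _ hc', hrel', List.map_append]
    have hgd' : d.getD g ([] : PySem.Set String) = ([] : PySem.Set String) := hgd
    simp [hgd', hcg, PySem.Set.add, PySem.Set.len, PySem.Set.contains]

lemma par_inner (m : String) (gs : List String) :
    ∀ (d : PySem.Dict String (PySem.Set String)) (c : PySem.Dict String Int),
      d.keys.Nodup → RelAB d c → gs.Nodup → (∀ g ∈ gs, m ∉ d.getD g PySem.Set.empty) →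
      RelAB (gs.foldl (step2 m) d) (gs.foldl (fun c g => c.modify g 0 (· + 1)) c) := by
  induction gs with
  | nil => intro d c _ hrel _ _; exact hrel
  | cons g t ih =>
    intro d c hnd hrel hnodup hfresh
    simp only [List.foldl]
    apply ih (step2 m d g) (c.modify g 0 (· + 1)) (step2_nodup m d g hnd)
      (par_step m g d c hnd hrel (hfresh g List.mem_cons_self))
      (List.Nodup.of_cons hnodup)
    intro g' hg'
    have hne : g' ≠ g := fun h => (List.nodup_cons.1 hnodup).1 (h ▸ hg')
    show m ∉ (step2 m d g).getD g' PySem.Set.empty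
    unfold step2
    rw [PySem.Dict.getD_insert, if_neg hne]
    exact hfresh g' (List.mem_cons_of_mem g hg')

lemma par_outer (n : Int) (l : List String) :
    ∀ (d : PySem.Dict String (PySem.Set String)) (c : PySem.Dict String Int),
      l.Nodup → d.keys.Nodup → RelAB d c → (∀ g x, x ∈ d.getD g PySem.Set.empty → x ∉ l) →
      RelAB (l.foldl (stepAred n) d) (l.foldl (stepB n) c) := by
  induction l with
  | nil => intro d c _ _ hrel _; exact hrel
  | cons m t ih =>
    intro d c hnodup hnd hrel hfresh
    simp only [List.foldl]
    have hmt : m ∉ t := (List.nodup_cons.1 hnodup).1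
    by_cases hlen : n ≤ PySem.Str.len m
    · rw [show stepAred n d m = (PySem.List.dedup (gramOcc m n)).foldl (step2 m) d from
            by unfold stepAred; rw [if_pos hlen],
          show stepB n c m = (PySem.List.dedup (gramOcc m n)).foldl
              (fun c g => c.modify g 0 (· + 1)) c from by unfold stepB; rw [if_pos hlen]]
      apply ih _ _ (List.nodup_cons.1 hnodup).2 (fold2_nodup m _ d hnd)
        (par_inner m _ d c hnd hrel
          (by rw [PySem.List.dedup_eq_ofList]; exact PySem.Set.nodup_ofList _)
          (fun g hg hmem => hfresh g m hmem List.mem_cons_self))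
      intro g x hx hxt
      rcases fold2_getD_sub m _ d g x hx with h | h
      · exact hfresh g x h (List.mem_cons_of_mem m hxt)
      · exact hmt (h ▸ hxt)
    · rw [show stepAred n d m = d from by unfold stepAred; rw [if_neg hlen],
          show stepB n c m = c from by unfold stepB; rw [if_neg hlen]]
      apply ih _ _ (List.nodup_cons.1 hnodup).2 hnd hrel
      intro g x hx hxt
      exact hfresh g x hx (List.mem_cons_of_mem m hxt)

/-- A's whole computation is the counter fold over the deduplicated middles -/
lemma A_as_stepB (middles : List String) (n : Int) :
    coverage_count middles n =
      ((PySem.List.dedup middles).foldl (stepB n) PySem.Dict.empty).items := by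
  rw [bridgeA, outer_dedup]
  have hnodup : (PySem.List.dedup middles).Nodup := by
    rw [PySem.List.dedup_eq_ofList]; exact PySem.Set.nodup_ofList middles
  rw [foldl_congr_inv (stepA n) (stepAred n) (fun d => d.keys.Nodup)
    (fun d m hd => stepA_nodup n d m hd) (fun d m hd => stepA_eq_red n d m hd)
    (PySem.List.dedup middles) PySem.Dict.empty (by simp)]
  have := par_outer n (PySem.List.dedup middles) PySem.Dict.empty PySem.Dict.empty
    hnodup (by simp) (by simp [RelAB, PySem.Dict.empty]) (by simp [PySem.Dict.getD_empty, PySem.Set.empty])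
  exact this.symm

-- the counter fold is Counter(stream) ----------------------------------------

lemma gramOcc_nil (m : String) (n : Int) (h : ¬ n ≤ PySem.Str.len m) : gramOcc m n = [] := by
  unfold gramOcc
  rw [PySem.List.pyRange_one_eq_nil (by omega)]
  rfl

lemma stepB_eq (n : Int) (c : PySem.Dict String Int) (m : String) :
    stepB n c m = (PySem.List.dedup (gramOcc m n)).foldl (fun c g => c.modify g 0 (· + 1)) c := by
  unfold stepB
  split_ifs with h
  · rfl
  · rw [gramOcc_nil m n h]
    rfl

lemma A_as_counter (middles : List String) (n : Int) :
    coverage_count middles n =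
      (PySem.Dict.counter (streamOf n (PySem.List.dedup middles))).items := by
  rw [A_as_stepB, PySem.Dict.counter_eq_foldl, streamOf, List.foldl_flatMap]
  have h : stepB n = fun (c : PySem.Dict String Int) (m : String) =>
      (PySem.List.dedup (gramOcc m n)).foldl (fun c g => c.modify g 0 (· + 1)) c :=
    funext fun c => funext fun m => stepB_eq n c m
  rw [h]

-- stream combinatorics --------------------------------------------------------

lemma update_dedup (s : PySem.Set String) (xs : List String) :
    PySem.Set.update s (PySem.List.dedup xs) = PySem.Set.update s xs := by
  rw [PySem.Set.update_eq_append_filter, PySem.Set.update_eq_append_filter,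
      PySem.List.dedup_eq_ofList, PySem.Set.ofList_ofList]

lemma ofList_stream (n : Int) (l : List String) :
    PySem.Set.ofList (streamOf n l) =
      PySem.List.dedup (l.flatMap (fun m => gramOcc m n)) := by
  induction l using List.reverseRecOn with
  | nil => simp [streamOf]
  | append_singleton l m ih =>
    unfold streamOf at *
    rw [List.flatMap_append, List.flatMap_append, PySem.Set.ofList_append, ih,
        PySem.List.dedup_eq_ofList, PySem.List.dedup_eq_ofList, PySem.Set.ofList_append]
    simp only [List.flatMap_cons, List.flatMap_nil, List.append_nil]
    rw [update_dedup]

lemma count_stream (n : Int) (g : String) (l : List String) :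
    (streamOf n l).count g = l.countP (fun m => decide (g ∈ gramOcc m n)) := by
  induction l with
  | nil => rfl
  | cons m t ih =>
    unfold streamOf at *
    rw [List.flatMap_cons, List.count_append, ih, List.countP_cons]
    by_cases h : g ∈ gramOcc m n
    · rw [List.count_eq_one_of_mem
        (by rw [PySem.List.dedup_eq_ofList]; exact PySem.Set.nodup_ofList _)
        (by rw [PySem.List.mem_dedup]; exact h)]
      simp [h, Nat.add_comm]
    · rw [List.count_eq_zero.mpr (by rw [PySem.List.mem_dedup]; exact h)]
      simp [h]

-- n-gram membership is substring containment (for 0 ≤ n) ----------------------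

lemma len_gram (m g : String) (n : Int) (hn : 0 ≤ n) (h : g ∈ gramOcc m n) :
    g.toList.length = n.toNat := by
  unfold gramOcc at h
  obtain ⟨i, hi, hg⟩ := List.mem_map.1 h
  rw [PySem.List.mem_pyRange_one] at hi
  have hlen : PySem.Str.len m = (m.toList.length : Int) := by simp
  have h0i : 0 ≤ i := hi.1
  have h0in : 0 ≤ i + n := by omega
  have : g.toList = (m.toList.drop i.toNat).take ((i + n).toNat - i.toNat) := by
    rw [← hg]
    simp only [PySem.Str.slice]
    simp [PySem.List.slice_toNat m.toList h0i h0in]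
  rw [this, List.length_take, List.length_drop]
  omega

lemma mem_gramOcc_iff (m g : String) (n : Int) (hn : 0 ≤ n)
    (hg : g.toList.length = n.toNat) :
    g ∈ gramOcc m n ↔ PySem.Str.isIn g m = true := by
  rw [PySem.Str.isIn_iff_infix]
  unfold gramOcc
  constructor
  · intro h
    obtain ⟨i, hi, hsl⟩ := List.mem_map.1 h
    rw [PySem.List.mem_pyRange_one] at hi
    have h0i : 0 ≤ i := hi.1
    have h0in : 0 ≤ i + n := by omega
    have : g.toList = (m.toList.drop i.toNat).take ((i + n).toNat - i.toNat) := by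
      rw [← hsl]
      simp only [PySem.Str.slice]
      simp [PySem.List.slice_toNat m.toList h0i h0in]
    rw [this]
    exact (List.take_prefix _ (m.toList.drop i.toNat)).isInfix.trans
      (List.drop_suffix i.toNat m.toList).isInfix
  · intro h
    obtain ⟨s, t, hst⟩ := h
    have hlen : PySem.Str.len m = (m.toList.length : Int) := by simp
    have hml : m.toList.length = s.length + g.toList.length + t.length := by
      rw [← hst]; simp [List.length_append]; omega
    apply List.mem_map.2
    refine ⟨(s.length : Int), ?_, ?_⟩
    · rw [PySem.List.mem_pyRange_one]
      constructor
      · exact Int.natCast_nonneg _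
      · rw [hlen]; omega
    · apply String.toList_inj.mp
      have h0s : (0 : Int) ≤ (s.length : Int) := Int.natCast_nonneg _
      have h0sn : (0 : Int) ≤ (s.length : Int) + n := by omega
      have hnn : ((s.length : Int) + n).toNat - ((s.length : Int)).toNat = g.toList.length := by
        omega
      have hdrop : m.toList.drop ((s.length : Int)).toNat = g.toList ++ t := by
        rw [show ((s.length : Int)).toNat = s.length by omega, ← hst, List.append_assoc,
            List.drop_left]
      have hsl : PySem.List.slice m.toList (some (s.length : Int)) (some ((s.length : Int) + n))
          = g.toList := by
        rw [PySem.List.slice_toNat m.toList h0s h0sn, hnn, hdrop, List.take_left' rfl]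
      simp [PySem.Str.slice, hsl]

-- the mapped form of port B ----------------------------------------------------

lemma bridgeB (middles : List String) (n : Int) :
    coverage_count_alt middles n =
      (PySem.List.dedup ((PySem.List.dedup middles).flatMap (fun m => gramOcc m n))).map
        (fun g => (g, ((PySem.List.dedup middles).map
          (fun m => if PySem.Str.isIn g m then (1 : Int) else 0)).sum)) := by
  unfold coverage_count_alt
  have hbody : (fun m => if n ≤ PySem.Str.len m then
      (PySem.List.pyRange 0 (PySem.Str.len m - n + 1) 1).map
        (fun i => PySem.Str.slice m (some i) (some (i + n)))
    else []) = fun m => gramOcc m n := by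
    funext m
    split_ifs with h
    · rfl
    · exact (gramOcc_nil m n h).symm
  simp only [hbody]
  have := PySem.Dict.items_foldl_insert_fresh
    (d := (PySem.Dict.empty : PySem.Dict String Int))
    (l := PySem.List.dedup ((PySem.List.dedup middles).flatMap (fun m => gramOcc m n)))
    (k := fun g => g)
    (v := fun g => ((PySem.List.dedup middles).map
      (fun m => if PySem.Str.isIn g m then (1 : Int) else 0)).sum)
    (by intro a _; simp)
    (by rw [show (fun (g : String) => g) = id from rfl, List.map_id,
            PySem.List.dedup_eq_ofList]
        exact PySem.Set.nodup_ofList _)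
  simpa using this

-- ===== VERDICT (by name: the statement is the Claim_ definition above) =====
theorem coverage_count_spec : Claim_equal_coverage_count := by
  intro middles n _ hpre
  show coverage_count middles n = coverage_count_alt middles n
  rw [A_as_counter, PySem.Dict.items_counter, ofList_stream, bridgeB]
  apply List.map_congr_left
  intro g hgmem
  have hglen : g.toList.length = n.toNat := by
    rw [PySem.List.mem_dedup, List.mem_flatMap] at hgmem
    obtain ⟨m0, _, hg0⟩ := hgmem
    exact len_gram m0 g n hpre hg0
  rw [count_stream, PySem.List.sum_map_ite_one_zero]
  congr 1
  rw [Int.natCast_inj]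
  apply List.countP_congr
  intro m _
  simp [mem_gramOcc_iff m g n hpre hglen]
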